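-- pv_equiv track=rewrite | github.com/anaticulae/utilo | utila/string/modify.py | ghost_replace
-- ===== SOURCE A (Python) =====
-- def ghost_replace(
--     text: str,
--     pattern: str,
--     replacement='*',
--     count: int = 1,
-- ) -> str:
--     """\
--     >>> ghost_replace('Hier spricht Helm', 'prich')
--     'Hier s*****t Helm'
--     >>> ghost_replace('Helm Helm Helm', 'elm', count=1)
--     'H*** Helm Helm'
--     >>> ghost_replace('ABCDEFG', ('A', 'D', 'F'))
--     '*BC*E*G'
--     """
--     if not isinstance(pattern, str):
--         for patt in pattern:
--             text = ghost_replace(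
--                 text,
--                 pattern=patt,
--                 replacement=replacement,
--                 count=1,
--             )
--         return text
--     new = replacement * len(pattern)
--     text = text.replace(pattern, new, count)
--     return text
-- ===== SOURCE B (Python) =====
-- def ghost_replace(
--     text: str,
--     pattern: str,
--     replacement='*',
--     count: int = 1,
-- ) -> str:
--     if not isinstance(pattern, str):
--         for patt in pattern:
--             text = ghost_replace(text, patt, replacement, 1)
--         return text
--     if pattern == '':
--         return text
--     mask = replacement * len(pattern)
--     pieces = []
--     i = 0
--     done = 0
--     while count < 0 or done < count:
--         j = text.find(pattern, i)
--         if j < 0: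
--             break
--         pieces.append(text[i:j])
--         pieces.append(mask)
--         i = j + len(pattern)
--         done += 1
--     pieces.append(text[i:])
--     return ''.join(pieces)
-- ===== Notes on version B (the rewrite author's own statement) =====
-- stated objective: alternative
-- what changed: B replaces A's single str.replace call by a hand-written scanning loop: it repeatedly str.find's the next occurrence, collects the gap fragment and the star mask into a list of pieces, and joins them at the end (empty pattern handled by an up-front no-op guard).
import Mathlib
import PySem

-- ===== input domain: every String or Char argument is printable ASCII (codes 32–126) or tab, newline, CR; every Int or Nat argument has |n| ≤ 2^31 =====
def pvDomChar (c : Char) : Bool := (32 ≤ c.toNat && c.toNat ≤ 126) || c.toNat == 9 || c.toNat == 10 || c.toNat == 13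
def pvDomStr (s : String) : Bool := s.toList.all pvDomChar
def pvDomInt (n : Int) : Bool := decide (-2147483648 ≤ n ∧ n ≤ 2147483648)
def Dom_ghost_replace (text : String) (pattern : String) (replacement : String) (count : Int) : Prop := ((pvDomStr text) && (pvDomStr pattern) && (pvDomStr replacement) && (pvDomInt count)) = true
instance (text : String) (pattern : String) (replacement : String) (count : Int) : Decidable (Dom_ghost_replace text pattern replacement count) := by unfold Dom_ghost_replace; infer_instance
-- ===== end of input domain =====

-- B replaces A's single str.replace call by a hand-written scanning loop (repeated
-- str.find of the next occurrence, collecting gap fragments and the star mask, joined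
-- at the end); objective: alternative decomposition, no speed claim.

-- ===== PORT A =====
-- exact port of Python's str.replace(old, new, count) on code-point lists:
-- count = 0 replaces nothing, count < 0 replaces all; the empty pattern inserts `new`
-- at successive boundaries (in A's call `new` is then empty, so the text is unchanged).
def pyReplaceCount (s pat new : List Char) (count : Int) : List Char :=
  if count = 0 then s
  else if pat = [] then
    new ++ (match s with
            | [] => []
            | c :: rest => c :: pyReplaceCount rest pat new (count - 1))
  else if hp : pat.isPrefixOf s then
    new ++ pyReplaceCount (s.drop pat.length) pat new (count - 1)
  else match s with
       | [] => []
       | c :: rest => c :: pyReplaceCount rest pat new count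
termination_by s.length
decreasing_by
  · simp
  · have hpre : pat <+: s := by simpa [List.isPrefixOf_iff_prefix] using hp
    have hlen : pat.length ≤ s.length := hpre.length_le
    have hpat : 0 < pat.length := List.length_pos_of_ne_nil (by assumption)
    have hs : 0 < s.length := lt_of_lt_of_le hpat hlen
    simp [List.length_drop]; omega
  · simp

-- A: new = replacement * len(pattern); return text.replace(pattern, new, count)
-- (the isinstance(pattern, str) tuple branch is unreachable here: pattern is a String)
def ghost_replace (text : String) (pattern : String) (replacement : String) (count : Int) : String :=
  String.ofList (pyReplaceCount text.toList pattern.toList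
    (PySem.List.pyRepeat replacement.toList (pattern.toList.length : Int)) count)

-- ===== PORT B =====
-- text.find(pattern, i), expressed on the suffix text[i:]: index of the first occurrence
def findSub (s sep : List Char) : Option Nat :=
  if sep.isPrefixOf s then some 0
  else match s with
       | [] => none
       | _ :: t => (findSub t sep).map (· + 1)

-- B's while loop: find the next occurrence, emit the gap piece and the mask, continue
-- after the occurrence with one fewer replacement allowed (''.join of B's pieces = this
-- concatenation). `fuel` only bounds the recursion: the loop consumes at least one
-- character of the text per iteration, so fuel = text length is enough.
def scanMaskGo (sep mask : List Char) : Nat → List Char → Int → List Char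
  | 0, s, _ => s
  | fuel + 1, s, m =>
    if m = 0 then s
    else match findSub s sep with
         | none => s
         | some j => s.take j ++ mask ++ scanMaskGo sep mask fuel (s.drop (j + sep.length)) (m - 1)

-- B: guard the empty pattern, else scan-and-mask with mask = replacement * len(pattern)
def ghost_replace_alt (text : String) (pattern : String) (replacement : String) (count : Int) : String :=
  if pattern = "" then text
  else
    String.ofList (scanMaskGo pattern.toList
      (PySem.List.pyRepeat replacement.toList (pattern.toList.length : Int))
      text.toList.length text.toList count)

-- ===== PRECONDITION & SPEC =====
def Spec_ghost_replace (text : String) (pattern : String) (replacement : String) (count : Int) (out : String) : Prop := out = ghost_replace_alt text pattern replacement count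
instance (text : String) (pattern : String) (replacement : String) (count : Int) (out : String) : Decidable (Spec_ghost_replace text pattern replacement count out) := by unfold Spec_ghost_replace; infer_instance

-- ===== CLAIM (what is proved, stated in full; the proofs are below) =====
def Claim_equal_ghost_replace : Prop := ∀ (text : String) (pattern : String) (replacement : String) (count : Int), Dom_ghost_replace text pattern replacement count → Spec_ghost_replace text pattern replacement count (ghost_replace text pattern replacement count)

-- ===== LEMMAS AND PROOFS =====

-- replacing the empty pattern by the empty mask leaves the text unchanged
theorem replace_empty_empty (s : List Char) (count : Int) :
    pyReplaceCount s [] [] count = s := by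
  induction s generalizing count with
  | nil => rw [pyReplaceCount]; simp
  | cons c rest ih => rw [pyReplaceCount]; by_cases h : count = 0 <;> simp [h, ih]

-- an occurrence found at j fits inside the text
theorem findSub_le (s sep : List Char) (j : Nat) (h : findSub s sep = some j) :
    j + sep.length ≤ s.length := by
  induction s generalizing j with
  | nil =>
    rw [findSub] at h
    by_cases hp : sep.isPrefixOf ([] : List Char)
    · have hnil : sep = [] := by
        simpa [List.isPrefixOf_iff_prefix, List.prefix_nil] using hp
      subst hnil
      simp [hp] at h
      omega
    · simp [hp] at h
  | cons c rest ih =>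
    rw [findSub] at h
    by_cases hp : sep.isPrefixOf (c :: rest)
    · have hpre : sep <+: (c :: rest) := by
        simpa [List.isPrefixOf_iff_prefix] using hp
      simp [hp] at h
      have := hpre.length_le
      simp at this ⊢; omega
    · simp [hp] at h
      obtain ⟨j', hj', rfl⟩ := h
      have := ih j' hj'
      simp; omega

-- no occurrence: the counted replace leaves the text unchanged
theorem replace_no_occ (s sep mask : List Char) (m : Int) (hsep : sep ≠ [])
    (h : findSub s sep = none) : pyReplaceCount s sep mask m = s := by
  induction s generalizing m with
  | nil =>
    rw [pyReplaceCount]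
    have hp : ¬ sep.isPrefixOf ([] : List Char) := by
      simp [List.isPrefixOf_iff_prefix, List.prefix_nil, hsep]
    by_cases hm : m = 0 <;> simp [hm, hsep, hp]
  | cons c rest ih =>
    rw [findSub] at h
    by_cases hp : sep.isPrefixOf (c :: rest)
    · simp [hp] at h
    · simp [hp] at h
      rw [pyReplaceCount]
      by_cases hm : m = 0 <;> simp [hm, hsep, hp, ih _ h]

-- an occurrence at j: the counted replace copies the gap, masks, and continues after it
theorem replace_jump (s sep mask : List Char) (j : Nat) (m : Int) (hsep : sep ≠ [])
    (h : findSub s sep = some j) (hm : m ≠ 0) :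
    pyReplaceCount s sep mask m =
      s.take j ++ mask ++ pyReplaceCount (s.drop (j + sep.length)) sep mask (m - 1) := by
  induction j generalizing s with
  | zero =>
    rw [findSub.eq_def] at h
    by_cases hp : sep.isPrefixOf s
    · rw [pyReplaceCount.eq_def]
      simp [hm, hsep, hp]
    · exfalso
      cases s with
      | nil => simp [hp] at h
      | cons c rest => simp [hp] at h
  | succ j' ih =>
    rw [findSub.eq_def] at h
    by_cases hp : sep.isPrefixOf s
    · simp [hp] at h
    · cases s with
      | nil => simp [hp] at h
      | cons c rest =>
        simp [hp] at h
        rw [pyReplaceCount]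
        simp only [hm, if_false, hsep, if_false]
        rw [dif_neg (by simpa using hp)]
        have hdrop : (c :: rest).drop (j' + 1 + sep.length) = rest.drop (j' + sep.length) := by
          have : j' + 1 + sep.length = (j' + sep.length) + 1 := by omega
          rw [this]; rfl
        simp [ih rest h, hdrop, List.take_succ_cons]

-- main bridge: B's find-scan loop computes A's counted replace, for a nonempty pattern
theorem scanGo_eq (sep mask : List Char) (hsep : sep ≠ []) :
    ∀ (fuel : Nat) (s : List Char) (m : Int), s.length ≤ fuel →
    scanMaskGo sep mask fuel s m = pyReplaceCount s sep mask m := by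
  intro fuel
  induction fuel with
  | zero =>
    intro s m hl
    have hs : s = [] := by
      cases s with
      | nil => rfl
      | cons c t => simp at hl
    subst hs
    have hf : findSub ([] : List Char) sep = none := by
      rw [findSub]
      simp [List.isPrefixOf_iff_prefix, List.prefix_nil, hsep]
    rw [scanMaskGo, replace_no_occ _ _ _ _ hsep hf]
  | succ fuel ih =>
    intro s m hl
    rw [scanMaskGo]
    by_cases hm : m = 0
    · rw [pyReplaceCount.eq_def]; simp [hm]
    · simp only [hm, if_false]
      cases hf : findSub s sep with
      | none => rw [replace_no_occ _ _ _ _ hsep hf]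
      | some j =>
        have hle := findSub_le s sep j hf
        have hp : 0 < sep.length := List.length_pos_of_ne_nil hsep
        rw [replace_jump _ _ _ _ _ hsep hf hm,
            ← ih (s.drop (j + sep.length)) (m - 1) (by rw [List.length_drop]; omega)]

-- ===== VERDICT (by name: the statement is the Claim_ definition above) =====
theorem ghost_replace_spec : Claim_equal_ghost_replace := by
  intro text pattern replacement count _
  unfold Spec_ghost_replace ghost_replace ghost_replace_alt
  by_cases hp : pattern = ""
  · subst hp
    simp [PySem.List.pyRepeat, replace_empty_empty]
  · have hne : pattern.toList ≠ [] := by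
      simp [String.toList_eq_nil_iff, hp]
    rw [if_neg hp, scanGo_eq _ _ hne _ _ _ (le_refl _)]
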